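-- pv_equiv track=rewrite | github.com/pypi-data/pypi-mirror-401 | packages/pdftl/pdftl-0.7.0-py3-none-any.whl/pdftl/cli/parser.py | split_args_by_separator
-- ===== SOURCE A (Python) =====
-- def split_args_by_separator(argv, separator="---"):
--     """Splits a list of arguments into stages based on a separator."""
--     stages, current_stage = ([], [])
--     for arg in argv:
--         if arg == separator:
--             stages.append(current_stage)
--             current_stage = []
--         else:
--             current_stage.append(arg)
--     stages.append(current_stage)
--     return stages
-- ===== SOURCE B (Python) =====
-- def split_args_by_separator(argv, separator="---"):
--     """Splits a list of arguments into stages based on a separator."""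
--     cuts = [i for i, a in enumerate(argv) if a == separator]
--     bounds = [-1] + cuts + [len(argv)]
--     return [argv[lo + 1:hi] for lo, hi in zip(bounds, bounds[1:])]
-- ===== Notes on version B (the rewrite author's own statement) =====
-- stated objective: alternative
-- what changed: B first collects all separator positions into a cut-index list, then emits every stage as a slice between consecutive boundaries ([-1] + cuts + [len]); A accumulates elements into a buffer and flushes it at each separator in one pass.
import Mathlib
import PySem

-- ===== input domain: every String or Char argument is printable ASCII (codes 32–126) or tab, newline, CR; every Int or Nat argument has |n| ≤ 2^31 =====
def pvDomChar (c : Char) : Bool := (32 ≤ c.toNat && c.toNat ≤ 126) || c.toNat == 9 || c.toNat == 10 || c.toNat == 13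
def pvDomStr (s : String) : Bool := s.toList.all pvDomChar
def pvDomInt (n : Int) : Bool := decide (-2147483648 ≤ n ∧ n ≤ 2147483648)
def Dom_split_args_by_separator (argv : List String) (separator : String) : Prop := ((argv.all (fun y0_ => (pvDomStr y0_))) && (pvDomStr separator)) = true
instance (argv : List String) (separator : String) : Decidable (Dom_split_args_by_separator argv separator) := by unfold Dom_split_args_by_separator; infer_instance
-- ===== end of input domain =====

-- B replaces A's one-pass accumulate-and-flush buffer by two staged passes:
-- collect the separator indices, then slice between consecutive boundaries.

-- ===== PORT A =====
-- forward loop with state (stages, current_stage); final 'stages.append(current_stage)'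
def split_args_by_separator (argv : List String) (separator : String) : List (List String) :=
  let st := argv.foldl
    (fun (st : List (List String) × List String) arg =>
      if arg = separator then (st.1 ++ [st.2], [])
      else (st.1, st.2 ++ [arg]))
    ([], [])
  st.1 ++ [st.2]

-- ===== PORT B =====
-- cuts = [i for i, a in enumerate(argv) if a == separator]
-- bounds = [-1] + cuts + [len(argv)]
-- [argv[lo+1:hi] for lo, hi in zip(bounds, bounds[1:])]
def split_args_by_separator_alt (argv : List String) (separator : String) : List (List String) :=
  let cuts := ((PySem.List.enumerate argv 0).filter (fun p => p.2 == separator)).map Prod.fst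
  let bounds := [(-1 : Int)] ++ cuts ++ [(argv.length : Int)]
  (bounds.zip bounds.tail).map (fun p => PySem.List.slice argv (some (p.1 + 1)) (some p.2))

-- ===== PRECONDITION & SPEC =====
def Spec_split_args_by_separator (argv : List String) (separator : String) (out : List (List String)) : Prop := out = split_args_by_separator_alt argv separator
instance (argv : List String) (separator : String) (out : List (List String)) : Decidable (Spec_split_args_by_separator argv separator out) := by unfold Spec_split_args_by_separator; infer_instance

-- ===== CLAIM (what is proved, stated in full; the proofs are below) =====
def Claim_equal_split_args_by_separator : Prop := ∀ (argv : List String) (separator : String), Dom_split_args_by_separator argv separator → Spec_split_args_by_separator argv separator (split_args_by_separator argv separator)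

-- ===== LEMMAS AND PROOFS =====

-- Invariant: after A has consumed argv[:k] (buffer = argv[start:k]), A's final result equals
-- stages-so-far ++ the slices B builds from the boundary list (start-1) :: cuts-of-the-suffix ++ [len].
theorem pv_inv (argv : List String) (separator : String) :
    ∀ (rest : List String) (k start : Nat) (stages : List (List String)),
      rest = argv.drop k → start ≤ k →
      (let st := rest.foldl
          (fun (st : List (List String) × List String) arg =>
            if arg = separator then (st.1 ++ [st.2], [])
            else (st.1, st.2 ++ [arg]))
          (stages, (argv.drop start).take (k - start))
       st.1 ++ [st.2])
      =
      (let bounds := [((start : Int) - 1)] ++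
          (((PySem.List.enumerate rest (k : Int)).filter (fun p => p.2 == separator)).map Prod.fst) ++
          [(argv.length : Int)]
       stages ++ (bounds.zip bounds.tail).map
          (fun p => PySem.List.slice argv (some (p.1 + 1)) (some p.2))) := by
  intro rest
  induction rest with
  | nil =>
    intro k start stages hrest hsk
    have hk : argv.length ≤ k := by
      have := List.drop_eq_nil_iff.mp hrest.symm
      omega
    have hsl : PySem.List.slice argv (some ((start : Int) - 1 + 1)) (some ((argv.length : Nat) : Int))
        = (argv.drop start).take (argv.length - start) := by
      have : ((start : Int) - 1 + 1) = ((start : Nat) : Int) := by ring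
      rw [this]; exact PySem.List.slice_natCast argv start argv.length
    simp only [List.foldl_nil, PySem.List.enumerate_nil, List.filter_nil, List.map_nil,
      List.nil_append, List.cons_append, List.tail, List.zip_cons_cons, List.zip_nil_right,
      List.map_cons, List.map_nil, hsl]
    have h1 : (argv.drop start).take (k - start) = argv.drop start := by
      apply List.take_of_length_le; simp; omega
    have h2 : (argv.drop start).take (argv.length - start) = argv.drop start := by
      apply List.take_of_length_le; simp
    rw [h1, h2]
  | cons a rest ih =>
    intro k start stages hrest hsk
    have hgk : argv[k]? = some a := by
      have : (argv.drop k)[0]? = some a := by rw [← hrest]; rfl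
      simpa using this
    have hdrop : argv.drop (k + 1) = rest := by
      rw [← List.drop_drop, ← hrest]; rfl
    simp only [PySem.List.enumerate_cons, List.foldl_cons, List.filter_cons]
    by_cases ha : a = separator
    · simp only [ha, beq_self_eq_true, if_true, List.map_cons]
      have hslice : PySem.List.slice argv (some ((start : Int) - 1 + 1)) (some ((k : Nat) : Int))
          = (argv.drop start).take (k - start) := by
        have : ((start : Int) - 1 + 1) = ((start : Nat) : Int) := by ring
        rw [this]; exact PySem.List.slice_natCast argv start k
      have hcast : ((k : Int) + 1) = (((k + 1 : Nat)) : Int) := by push_cast; ring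
      have hstart : ((k : Int)) = (((k + 1 : Nat) : Int) - 1) := by push_cast; ring
      have hrec := ih (k + 1) (k + 1) (stages ++ [(argv.drop start).take (k - start)])
        hdrop.symm (le_refl _)
      simp only [Nat.sub_self, List.take_zero] at hrec
      rw [hrec, hcast]
      simp only [List.cons_append, List.tail, hstart]
      simp
      exact (PySem.List.slice_natCast argv start k).symm
    · have hne : (a == separator) = false := by simpa using ha
      simp only [if_neg ha, hne]
      have hklen : k < argv.length := by
        by_contra h
        rw [List.getElem?_eq_none (by omega)] at hgk
        simp at hgk
      have hstep : (argv.drop start).take (k - start) ++ [a]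
          = (argv.drop start).take (k + 1 - start) := by
        have h1 : k + 1 - start = (k - start) + 1 := by omega
        rw [h1, List.take_add_one]
        have : (argv.drop start)[k - start]? = some a := by
          rw [List.getElem?_drop]
          have : start + (k - start) = k := by omega
          rw [this]; exact hgk
        rw [this]; rfl
      have hcast : ((k : Int) + 1) = (((k + 1 : Nat)) : Int) := by push_cast; ring
      rw [hstep, hcast]
      exact ih (k + 1) start stages hdrop.symm (by omega)

-- ===== VERDICT (by name: the statement is the Claim_ definition above) =====
theorem split_args_by_separator_spec : Claim_equal_split_args_by_separator := by
  intro argv separator _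
  unfold Spec_split_args_by_separator split_args_by_separator split_args_by_separator_alt
  have := pv_inv argv separator argv 0 0 [] (by simp) (le_refl 0)
  simpa using this
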